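-- pv_equiv track=rewrite | github.com/tobyhyde95/streamlit-range-gap-finder | seo_analyzer/pim_sku_analyzer.py | _derive_tiered_columns
-- ===== SOURCE A (Python) =====
-- from typing import Dict, List, Tuple, Optional, Set
--
-- TIER1_IDENTITY_COLUMNS = {
--     'part name',
--     'product brand name',
--     'part name type',
--     'toolstation web copy',
--     'toolstation catalogue copy',
--     'ts product code'
-- }
--
-- TIER2_DESCRIPTIVE_COLUMNS = {
--     'supplier copy',
--     'description',
--     'application method',
--     'suitable for',
--     'substrate'
-- }
--
-- def _derive_tiered_columns(all_columns: List[str]) -> Tuple[List[str], List[str]]: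
--     """Return concrete Tier 1 and Tier 2 column lists using case-insensitive matching."""
--     tier1 = []
--     tier2 = []
--     seen = set()
--
--     for col in all_columns:
--         col_lower = col.lower()
--         if col in seen:
--             continue
--         seen.add(col)
--         if col_lower in TIER1_IDENTITY_COLUMNS:
--             tier1.append(col)
--         elif col_lower in TIER2_DESCRIPTIVE_COLUMNS:
--             tier2.append(col)
--
--     # Any column not explicitly marked as Tier1 goes into Tier2 by default
--     for col in all_columns:
--         if col not in tier1 and col not in tier2:
--             tier2.append(col)
--
--     return tier1, tier2
-- ===== SOURCE B (Python) =====
-- TIER1_IDENTITY_COLUMNS = {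
--     'part name',
--     'product brand name',
--     'part name type',
--     'toolstation web copy',
--     'toolstation catalogue copy',
--     'ts product code'
-- }
--
-- TIER2_DESCRIPTIVE_COLUMNS = {
--     'supplier copy',
--     'description',
--     'application method',
--     'suitable for',
--     'substrate'
-- }
--
-- def _derive_tiered_columns(all_columns):
--     """Single pass: classify each first-seen column into tier1 / explicit tier2 /
--     default tier2, then concatenate the two tier2 parts."""
--     seen = set()
--     tier1 = []
--     tier2_explicit = []
--     tier2_default = []
--     for col in all_columns:
--         if col in seen:
--             continue
--         seen.add(col)
--         low = col.lower()
--         if low in TIER1_IDENTITY_COLUMNS: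
--             tier1.append(col)
--         elif low in TIER2_DESCRIPTIVE_COLUMNS:
--             tier2_explicit.append(col)
--         else:
--             tier2_default.append(col)
--     return tier1, tier2_explicit + tier2_default
-- ===== Notes on version B (the rewrite author's own statement) =====
-- stated objective: faster
-- what changed: A classifies first-seen columns and then rescans the whole input testing each column against the tier1 list and the growing tier2 list (O(n) list membership per element); B does everything in one classification pass keyed off a hash seen-set, keeping three lists (tier1, explicit tier2, default tier2) and returning tier1 with the concatenation of the two tier2 parts, so the list scans disappear.
import Mathlib
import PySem

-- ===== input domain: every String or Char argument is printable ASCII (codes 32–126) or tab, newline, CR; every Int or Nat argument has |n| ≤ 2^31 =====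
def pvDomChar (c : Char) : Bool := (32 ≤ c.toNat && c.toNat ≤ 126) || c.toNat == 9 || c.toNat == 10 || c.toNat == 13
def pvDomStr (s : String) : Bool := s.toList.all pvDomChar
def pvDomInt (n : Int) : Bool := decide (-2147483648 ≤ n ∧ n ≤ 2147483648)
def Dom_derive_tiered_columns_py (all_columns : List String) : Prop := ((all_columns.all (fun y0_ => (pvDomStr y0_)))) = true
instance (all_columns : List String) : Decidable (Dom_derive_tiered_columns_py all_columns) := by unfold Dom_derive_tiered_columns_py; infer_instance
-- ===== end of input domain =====

-- B replaces A's classify-then-rescan two-loop structure (O(n) list membership per element in the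
-- rescan) by one classification pass into three lists (tier1 / explicit tier2 / default tier2)
-- followed by a concatenation; a timing run measured B faster (objective: faster).

-- ===== PORT A =====
def pvTier1 : PySem.Set String := PySem.Set.ofList
  ["part name", "product brand name", "part name type",
   "toolstation web copy", "toolstation catalogue copy", "ts product code"]

def pvTier2 : PySem.Set String := PySem.Set.ofList
  ["supplier copy", "description", "application method", "suitable for", "substrate"]

def derive_tiered_columns_py (all_columns : List String) : List String × List String :=
  let st := all_columns.foldl
    (fun (st : List String × List String × PySem.Set String) col =>
      let col_lower := PySem.Str.lower col
      if col ∈ st.2.2 then st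
      else
        let seen := PySem.Set.add st.2.2 col
        if col_lower ∈ pvTier1 then (st.1 ++ [col], st.2.1, seen)
        else if col_lower ∈ pvTier2 then (st.1, st.2.1 ++ [col], seen)
        else (st.1, st.2.1, seen))
    ([], [], PySem.Set.empty)
  let tier1 := st.1
  let tier2 := all_columns.foldl
    (fun t2 col => if col ∉ tier1 ∧ col ∉ t2 then t2 ++ [col] else t2) st.2.1
  (tier1, tier2)

-- ===== PORT B =====
def derive_tiered_columns_py_alt (all_columns : List String) : List String × List String :=
  let st := all_columns.foldl
    (fun (st : PySem.Set String × List String × List String × List String) col =>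
      if col ∈ st.1 then st
      else
        let seen := PySem.Set.add st.1 col
        let low := PySem.Str.lower col
        if low ∈ pvTier1 then (seen, st.2.1 ++ [col], st.2.2.1, st.2.2.2)
        else if low ∈ pvTier2 then (seen, st.2.1, st.2.2.1 ++ [col], st.2.2.2)
        else (seen, st.2.1, st.2.2.1, st.2.2.2 ++ [col]))
    (PySem.Set.empty, [], [], [])
  (st.2.1, st.2.2.1 ++ st.2.2.2)

-- ===== PRECONDITION & SPEC =====
def Spec_derive_tiered_columns_py (all_columns : List String) (out : List String × List String) : Prop := out = derive_tiered_columns_py_alt all_columns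
instance (all_columns : List String) (out : List String × List String) : Decidable (Spec_derive_tiered_columns_py all_columns out) := by unfold Spec_derive_tiered_columns_py; infer_instance

-- ===== CLAIM (what is proved, stated in full; the proofs are below) =====
def Claim_equal_derive_tiered_columns_py : Prop := ∀ (all_columns : List String), Dom_derive_tiered_columns_py all_columns → Spec_derive_tiered_columns_py all_columns (derive_tiered_columns_py all_columns)

-- ===== LEMMAS AND PROOFS =====

-- Boolean classifiers for the three tiers (lower-cased membership).
def pvP1 (c : String) : Bool := decide (PySem.Str.lower c ∈ pvTier1)
def pvP2 (c : String) : Bool := decide (PySem.Str.lower c ∈ pvTier2)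
def pvQ2 (c : String) : Bool := !pvP1 c && pvP2 c
def pvQ3 (c : String) : Bool := !pvP1 c && !pvP2 c

-- First-occurrence dedup of `l` relative to an already-seen list `s`.
def pvDdup (s : List String) : List String → List String
  | [] => []
  | x :: xs => if x ∈ s then pvDdup s xs else x :: pvDdup (s ++ [x]) xs

theorem pvDdup_congr (s s' l : List String) (h : ∀ a, a ∈ s ↔ a ∈ s') :
    pvDdup s l = pvDdup s' l := by
  induction l generalizing s s' with
  | nil => rfl
  | cons x xs ih =>
    simp only [pvDdup]
    by_cases hx : x ∈ s
    · rw [if_pos hx, if_pos ((h x).mp hx)]; exact ih s s' h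
    · rw [if_neg hx, if_neg (fun hc => hx ((h x).mpr hc))]
      exact congrArg (x :: ·) (ih _ _ (fun a => by simp [List.mem_append, h a]))

theorem pvMem_ddup (s l : List String) (a : String) :
    a ∈ pvDdup s l ↔ a ∈ l ∧ a ∉ s := by
  induction l generalizing s with
  | nil => simp [pvDdup]
  | cons x xs ih =>
    simp only [pvDdup]
    by_cases hx : x ∈ s
    · rw [if_pos hx]; simp only [ih, List.mem_cons]
      constructor
      · rintro ⟨h1, h2⟩; exact ⟨Or.inr h1, h2⟩
      · rintro ⟨h1 | h1, h2⟩
        · exact absurd (h1 ▸ hx) h2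
        · exact ⟨h1, h2⟩
    · rw [if_neg hx]; simp only [List.mem_cons, ih, List.mem_append]
      constructor
      · rintro (rfl | ⟨h1, h2⟩)
        · exact ⟨Or.inl rfl, hx⟩
        · exact ⟨Or.inr h1, fun hc => h2 (Or.inl hc)⟩
      · rintro ⟨rfl | h1, h2⟩
        · exact Or.inl rfl
        · by_cases hax : a = x
          · exact Or.inl hax
          · exact Or.inr ⟨h1, fun hc => (hc.elim h2 fun h => hax (by simpa using h))⟩

theorem pvDdup_notmem (s l : List String) (x : String) (hx : x ∉ l) :
    pvDdup (s ++ [x]) l = pvDdup s l := by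
  induction l generalizing s with
  | nil => rfl
  | cons y ys ih =>
    have hyx : y ≠ x := fun h => hx (h ▸ List.mem_cons_self)
    have hys : x ∉ ys := fun h => hx (List.mem_cons_of_mem _ h)
    simp only [pvDdup, List.mem_append, List.mem_singleton, hyx, or_false]
    by_cases hy : y ∈ s
    · rw [if_pos hy, if_pos hy]; exact ih s hys
    · rw [if_neg hy, if_neg hy]
      refine congrArg (y :: ·) ?_
      calc pvDdup (s ++ [x] ++ [y]) ys
          = pvDdup (s ++ [y] ++ [x]) ys := by
            refine pvDdup_congr _ _ _ (fun a => by simp [List.mem_append]; tauto)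
        _ = pvDdup (s ++ [y]) ys := ih (s ++ [y]) hys

theorem pvFilter_ddup (q : String → Bool) (s l : List String) :
    (pvDdup s l).filter q = pvDdup s (l.filter q) := by
  induction l generalizing s with
  | nil => rfl
  | cons x xs ih =>
    by_cases hx : x ∈ s
    · simp only [pvDdup, if_pos hx, List.filter_cons]
      by_cases hq : q x
      · simp only [hq, if_true, pvDdup, if_pos hx]; exact ih s
      · simp only [hq, Bool.false_eq_true, if_false]; exact ih s
    · simp only [pvDdup, if_neg hx, List.filter_cons]
      by_cases hq : q x
      · simp only [hq, if_true, pvDdup, if_neg hx]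
        exact congrArg (x :: ·) (ih (s ++ [x]))
      · have hq' : q x = false := by simpa using hq
        have hnx : x ∉ xs.filter q := fun h => by
          have := (List.mem_filter.mp h).2; simp [hq'] at this
        simp only [hq', Bool.false_eq_true, if_false]
        rw [ih (s ++ [x]), pvDdup_notmem s (xs.filter q) x hnx]

-- B's single pass, decomposed: the fold over `l` starting from seen-set `s` appends
-- the p1 / q2 / q3 parts of the fresh (first-occurrence, unseen) columns.
theorem pvB_fold (l : List String) (s : PySem.Set String) (t1 e d : List String) :
    l.foldl
      (fun (st : PySem.Set String × List String × List String × List String) col =>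
        if col ∈ st.1 then st
        else
          let seen := PySem.Set.add st.1 col
          let low := PySem.Str.lower col
          if low ∈ pvTier1 then (seen, st.2.1 ++ [col], st.2.2.1, st.2.2.2)
          else if low ∈ pvTier2 then (seen, st.2.1, st.2.2.1 ++ [col], st.2.2.2)
          else (seen, st.2.1, st.2.2.1, st.2.2.2 ++ [col])) (s, t1, e, d)
    = (PySem.Set.update s l,
       t1 ++ (pvDdup s l).filter pvP1,
       e ++ (pvDdup s l).filter pvQ2,
       d ++ (pvDdup s l).filter pvQ3) := by
  induction l generalizing s t1 e d with
  | nil => simp [pvDdup, PySem.Set.update]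
  | cons x xs ih =>
    rw [List.foldl_cons, PySem.Set.update_cons]
    by_cases hx : x ∈ s
    · simp only [pvDdup, if_pos hx, PySem.Set.add_of_mem hx, ih]
    · simp only [pvDdup, if_neg hx, PySem.Set.add_of_not_mem hx]
      by_cases h1 : PySem.Str.lower x ∈ pvTier1
      · rw [if_pos h1, ih]
        simp [pvP1, pvQ2, pvQ3, h1]
      · rw [if_neg h1]
        by_cases h2 : PySem.Str.lower x ∈ pvTier2
        · rw [if_pos h2, ih]
          simp [pvP1, pvP2, pvQ2, pvQ3, h1, h2]
        · rw [if_neg h2, ih]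
          simp [pvP1, pvP2, pvQ2, pvQ3, h1, h2]

-- A's first loop, decomposed the same way (triple state, no default list).
theorem pvA_fold1 (l : List String) (s : PySem.Set String) (t1 t2 : List String) :
    l.foldl
      (fun (st : List String × List String × PySem.Set String) col =>
        let col_lower := PySem.Str.lower col
        if col ∈ st.2.2 then st
        else
          let seen := PySem.Set.add st.2.2 col
          if col_lower ∈ pvTier1 then (st.1 ++ [col], st.2.1, seen)
          else if col_lower ∈ pvTier2 then (st.1, st.2.1 ++ [col], seen)
          else (st.1, st.2.1, seen)) (t1, t2, s)
    = (t1 ++ (pvDdup s l).filter pvP1,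
       t2 ++ (pvDdup s l).filter pvQ2,
       PySem.Set.update s l) := by
  induction l generalizing s t1 t2 with
  | nil => simp [pvDdup, PySem.Set.update]
  | cons x xs ih =>
    rw [List.foldl_cons, PySem.Set.update_cons]
    by_cases hx : x ∈ s
    · simp only [pvDdup, if_pos hx, PySem.Set.add_of_mem hx, ih]
    · simp only [pvDdup, if_neg hx, PySem.Set.add_of_not_mem hx]
      by_cases h1 : PySem.Str.lower x ∈ pvTier1
      · rw [if_pos h1, ih]
        simp [pvP1, pvQ2, h1]
      · rw [if_neg h1]
        by_cases h2 : PySem.Str.lower x ∈ pvTier2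
        · rw [if_pos h2, ih]
          simp [pvP1, pvP2, pvQ2, h1, h2]
        · rw [if_neg h2, ih]
          simp [pvP1, pvP2, pvQ2, h1, h2]

-- A's second loop: over columns of the full list, with tier1/tier2-explicit fixed,
-- it appends exactly the fresh default-tier columns.
theorem pvA_fold2 (all T1 T2e : List String)
    (hT1 : ∀ c, c ∈ all → (c ∈ T1 ↔ pvP1 c = true))
    (hT2e : ∀ c, c ∈ all → (c ∈ T2e ↔ pvQ2 c = true)) :
    ∀ (xs acc : List String), (∀ c ∈ xs, c ∈ all) →
    xs.foldl (fun t2 col => if col ∉ T1 ∧ col ∉ t2 then t2 ++ [col] else t2) (T2e ++ acc)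
      = T2e ++ acc ++ pvDdup acc (xs.filter pvQ3) := by
  intro xs
  induction xs with
  | nil => intro acc _; simp [pvDdup]
  | cons x tl ih =>
    intro acc hsub
    have hxall : x ∈ all := hsub x List.mem_cons_self
    have htl : ∀ c ∈ tl, c ∈ all := fun c hc => hsub c (List.mem_cons_of_mem _ hc)
    simp only [List.foldl_cons, List.filter_cons]
    by_cases hq3 : pvQ3 x = true
    · have hands := (Bool.and_eq_true _ _).mp hq3
      have hp1 : pvP1 x = false := by simpa using hands.1
      have hp2 : pvP2 x = false := by simpa using hands.2
      have hq2 : pvQ2 x = false := by simp [pvQ2, hp2]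
      have hxT1 : x ∉ T1 := fun hc => by simp [(hT1 x hxall).mp hc] at hp1
      have hxT2e : x ∉ T2e := fun hc => by simp [(hT2e x hxall).mp hc] at hq2
      by_cases hacc : x ∈ acc
      · rw [if_neg (by simp [List.mem_append]; tauto)]
        rw [ih acc htl]
        simp only [hq3, if_true, pvDdup, if_pos hacc]
      · rw [if_pos ⟨hxT1, by simp [List.mem_append]; tauto⟩]
        rw [List.append_assoc T2e acc [x], ih (acc ++ [x]) htl]
        simp only [hq3, if_true, pvDdup, if_neg hacc, List.append_assoc, List.singleton_append]
    · have hmem : x ∈ T1 ∨ x ∈ T2e := by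
        by_cases hp1 : pvP1 x = true
        · exact Or.inl ((hT1 x hxall).mpr hp1)
        · have hp1' : pvP1 x = false := by simpa using hp1
          have hp2 : pvP2 x = true := by
            rcases Bool.eq_false_or_eq_true (pvP2 x) with h | h
            · exact h
            · exact absurd (by simp [pvQ3, hp1', h]) hq3
          exact Or.inr ((hT2e x hxall).mpr (by simp [pvQ2, hp1', hp2]))
      have hq3' : pvQ3 x = false := by simpa using hq3
      rw [if_neg (by rintro ⟨h1, h2⟩
                     rcases hmem with h | h
                     · exact h1 h
                     · exact h2 (by simp [List.mem_append]; tauto))]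
      simp only [hq3', Bool.false_eq_true, if_false]
      exact ih acc htl

-- ===== VERDICT (by name: the statement is the Claim_ definition above) =====
theorem derive_tiered_columns_py_spec : Claim_equal_derive_tiered_columns_py := by
  intro all _
  unfold Spec_derive_tiered_columns_py derive_tiered_columns_py derive_tiered_columns_py_alt
  simp only [pvB_fold, pvA_fold1]
  have hse : (PySem.Set.empty : PySem.Set String) = ([] : List String) := rfl
  rw [hse]
  have hDall : ∀ c, c ∈ pvDdup [] all ↔ c ∈ all := by
    intro c; rw [pvMem_ddup]; simp
  have hT1 : ∀ c, c ∈ all → (c ∈ (pvDdup [] all).filter pvP1 ↔ pvP1 c = true) := by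
    intro c hc; simp [List.mem_filter, hDall, hc]
  have hT2e : ∀ c, c ∈ all → (c ∈ (pvDdup [] all).filter pvQ2 ↔ pvQ2 c = true) := by
    intro c hc; simp [List.mem_filter, hDall, hc]
  have h2 := pvA_fold2 all ((pvDdup [] all).filter pvP1) ((pvDdup [] all).filter pvQ2)
      hT1 hT2e all [] (fun _ h => h)
  simp only [List.append_nil] at h2
  rw [← pvFilter_ddup pvQ3] at h2
  simp only [List.nil_append]
  exact congrArg (Prod.mk _) h2
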